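-- pv_equiv track=rewrite | github.com/scowalt/ccgram | src/ccbot/interactive_prompt_formatter.py | _trim_blank_edges
-- ===== SOURCE A (Python) =====
-- def _trim_blank_edges(lines: list[str]) -> list[str]:
--     start = 0
--     end = len(lines)
--     while start < end and not lines[start].strip():
--         start += 1
--     while end > start and not lines[end - 1].strip():
--         end -= 1
--     return lines[start:end]
-- ===== SOURCE B (Python) =====
-- def _trim_blank_edges(lines: list[str]) -> list[str]:
--     idxs = [i for i in range(len(lines)) if lines[i].strip()]
--     if not idxs:
--         return []
--     return lines[idxs[0]: idxs[-1] + 1]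
-- ===== Notes on version B (the rewrite author's own statement) =====
-- stated objective: simpler
-- what changed: Replaces the two inward-shrinking boundary while-loops with one pass collecting all non-blank indices, then a single slice between the first and last of them.
import Mathlib
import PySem

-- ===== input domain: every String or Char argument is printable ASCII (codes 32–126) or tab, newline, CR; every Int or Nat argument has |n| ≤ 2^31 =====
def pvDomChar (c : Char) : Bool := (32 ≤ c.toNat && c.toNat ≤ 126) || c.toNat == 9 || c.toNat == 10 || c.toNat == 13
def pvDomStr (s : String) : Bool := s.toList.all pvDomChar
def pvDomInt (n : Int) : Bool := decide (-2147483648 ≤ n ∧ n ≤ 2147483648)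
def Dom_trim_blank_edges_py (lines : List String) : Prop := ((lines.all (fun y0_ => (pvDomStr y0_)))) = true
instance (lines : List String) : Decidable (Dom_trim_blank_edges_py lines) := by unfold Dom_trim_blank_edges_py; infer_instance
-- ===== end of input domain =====

-- B replaces A's two inward-shrinking boundary while-loops with one pass collecting
-- all non-blank indices and a single slice between the first and last of them (simpler decomposition, same cost).


-- ===== PORT A =====
-- `not lines[i].strip()` — Python truthiness of the stripped string; the index is always in range
-- at each use (guarded by start < end ≤ len), so getD is exact here.
def pvBlank (lines : List String) (i : Nat) : Bool := PySem.Str.strip (lines.getD i "") == ""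

-- `while start < end and not lines[start].strip(): start += 1`
def pvLoop1 (lines : List String) (start e : Nat) : Nat :=
  if start < e ∧ pvBlank lines start then pvLoop1 lines (start + 1) e else start
termination_by e - start
decreasing_by omega

-- `while end > start and not lines[end - 1].strip(): end -= 1`
def pvLoop2 (lines : List String) (start e : Nat) : Nat :=
  if e > start ∧ pvBlank lines (e - 1) then pvLoop2 lines start (e - 1) else e
termination_by e
decreasing_by omega

def trim_blank_edges_py (lines : List String) : List String :=
  let start := pvLoop1 lines 0 lines.length
  let e := pvLoop2 lines start lines.length
  PySem.List.slice lines (some (start : Int)) (some (e : Int))   -- lines[start:end]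

-- ===== PORT B =====
def trim_blank_edges_py_alt (lines : List String) : List String :=
  -- idxs = [i for i in range(len(lines)) if lines[i].strip()]
  let idxs := (List.range lines.length).filter (fun i => !(pvBlank lines i))
  match idxs.head?, idxs.getLast? with       -- idxs[0], idxs[-1] when idxs is non-empty
  | some f, some l => PySem.List.slice lines (some (f : Int)) (some ((l : Int) + 1))
  | _, _ => []                               -- `if not idxs: return []`

-- ===== PRECONDITION & SPEC =====
def Spec_trim_blank_edges_py (lines : List String) (out : List String) : Prop := out = trim_blank_edges_py_alt lines
instance (lines : List String) (out : List String) : Decidable (Spec_trim_blank_edges_py lines out) := by unfold Spec_trim_blank_edges_py; infer_instance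

-- ===== CLAIM (what is proved, stated in full; the proofs are below) =====
def Claim_equal_trim_blank_edges_py : Prop := ∀ (lines : List String), Dom_trim_blank_edges_py lines → Spec_trim_blank_edges_py lines (trim_blank_edges_py lines)

-- ===== LEMMAS AND PROOFS =====

-- sorted-list facts
theorem pvHead_le {l : List Nat} (h : l.Pairwise (· < ·)) {f x : Nat}
    (hf : l.head? = some f) (hx : x ∈ l) : f ≤ x := by
  cases l with
  | nil => cases hx
  | cons a t =>
    simp at hf; subst hf
    cases hx with
    | head => exact le_refl _
    | tail _ hx => exact le_of_lt ((List.pairwise_cons.mp h).1 x hx)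

theorem pvLe_getLast {l : List Nat} (h : l.Pairwise (· < ·)) {g x : Nat}
    (hg : l.getLast? = some g) (hx : x ∈ l) : x ≤ g := by
  induction l with
  | nil => cases hx
  | cons a t ih =>
    cases t with
    | nil =>
      simp at hg hx; omega
    | cons b u =>
      rw [List.getLast?_cons_cons] at hg
      cases hx with
      | head =>
        have hm : g ∈ b :: u := List.mem_of_getLast? hg
        exact le_of_lt ((List.pairwise_cons.mp h).1 g hm)
      | tail _ hx => exact ih (List.pairwise_cons.mp h).2 hg hx

-- loop characterisations
theorem pvLoop1_all_blank (lines : List String) (s e : Nat) (hse : s ≤ e)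
    (hb : ∀ i, s ≤ i → i < e → pvBlank lines i = true) :
    pvLoop1 lines s e = e := by
  by_cases h : s < e
  · rw [pvLoop1]
    rw [if_pos ⟨h, hb s (le_refl _) h⟩]
    exact pvLoop1_all_blank lines (s + 1) e (by omega) (fun i h1 h2 => hb i (by omega) h2)
  · rw [pvLoop1]
    rw [if_neg (by tauto)]
    -- s ≥ e and loop1 cannot exceed; here guard fails so result is s; but we need = e.
    omega
termination_by e - s
decreasing_by omega

theorem pvLoop1_finds (lines : List String) (s e f : Nat)
    (hsf : s ≤ f) (hfe : f < e)
    (hb : ∀ i, s ≤ i → i < f → pvBlank lines i = true)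
    (hf : pvBlank lines f = false) :
    pvLoop1 lines s e = f := by
  rw [pvLoop1]
  by_cases h : s = f
  · subst h; rw [if_neg (by simp [hf])]
  · rw [if_pos ⟨by omega, hb s (le_refl _) (by omega)⟩]
    exact pvLoop1_finds lines (s + 1) e f (by omega) hfe
      (fun i h1 h2 => hb i (by omega) h2) hf
termination_by f - s
decreasing_by omega

theorem pvLoop2_stop (lines : List String) (s : Nat) :
    pvLoop2 lines s s = s := by
  rw [pvLoop2]; rw [if_neg (by omega)]

theorem pvLoop2_finds (lines : List String) (s e l : Nat)
    (hsl : s ≤ l) (hle : l < e)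
    (hb : ∀ i, l < i → i < e → pvBlank lines i = true)
    (hl : pvBlank lines l = false) :
    pvLoop2 lines s e = l + 1 := by
  rw [pvLoop2]
  by_cases h : e = l + 1
  · subst h; simp only [Nat.add_sub_cancel]
    rw [if_neg (by simp [hl])]
  · rw [if_pos ⟨by omega, hb (e - 1) (by omega) (by omega)⟩]
    exact pvLoop2_finds lines s (e - 1) l hsl (by omega)
      (fun i h1 h2 => hb i h1 (by omega)) hl
termination_by e
decreasing_by omega

theorem pvIdxs_pairwise (lines : List String) :
    ((List.range lines.length).filter (fun i => !(pvBlank lines i))).Pairwise (· < ·) :=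
  (List.pairwise_lt_range).filter _

theorem pvMem_idxs (lines : List String) (i : Nat) :
    i ∈ (List.range lines.length).filter (fun i => !(pvBlank lines i)) ↔
      i < lines.length ∧ pvBlank lines i = false := by
  simp [List.mem_filter]

theorem trim_blank_edges_py_eq (lines : List String) :
    trim_blank_edges_py lines = trim_blank_edges_py_alt lines := by
  unfold trim_blank_edges_py trim_blank_edges_py_alt
  set idxs := (List.range lines.length).filter (fun i => !(pvBlank lines i)) with hidxs
  cases hI : idxs with
  | nil =>
    have hb : ∀ i, i < lines.length → pvBlank lines i = true := by
      intro i hi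
      by_contra hc
      have : i ∈ idxs := (pvMem_idxs lines i).mpr ⟨hi, by revert hc; cases pvBlank lines i <;> simp⟩
      rw [hI] at this; cases this
    have h1 : pvLoop1 lines 0 lines.length = lines.length :=
      pvLoop1_all_blank lines 0 lines.length (Nat.zero_le _) (fun i _ h2 => hb i h2)
    simp only [h1, List.head?_nil, List.getLast?_nil]
    rw [pvLoop2_stop]
    rw [PySem.List.slice_natCast]
    simp
  | cons f t =>
    have hhead : idxs.head? = some f := by rw [hI]; rfl
    have hne : idxs ≠ [] := by rw [hI]; simp
    obtain ⟨l, hlast⟩ : ∃ l, idxs.getLast? = some l :=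
      ⟨idxs.getLast hne, List.getLast?_eq_some_getLast hne⟩
    have hfI : f ∈ idxs := hI ▸ List.mem_cons_self
    have hfm := (pvMem_idxs lines f).mp hfI
    have hlm := (pvMem_idxs lines l).mp (List.mem_of_getLast? hlast)
    have hfl : f ≤ l := pvHead_le (pvIdxs_pairwise lines) hhead (List.mem_of_getLast? hlast)
    have hbefore : ∀ i, 0 ≤ i → i < f → pvBlank lines i = true := by
      intro i _ hif
      by_contra hc
      have him : i ∈ idxs := (pvMem_idxs lines i).mpr
        ⟨by omega, by revert hc; cases pvBlank lines i <;> simp⟩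
      have := pvHead_le (pvIdxs_pairwise lines) hhead him
      omega
    have hafter : ∀ i, l < i → i < lines.length → pvBlank lines i = true := by
      intro i hli hi
      by_contra hc
      have him : i ∈ idxs := (pvMem_idxs lines i).mpr
        ⟨hi, by revert hc; cases pvBlank lines i <;> simp⟩
      have := pvLe_getLast (pvIdxs_pairwise lines) hlast him
      omega
    have h1 : pvLoop1 lines 0 lines.length = f :=
      pvLoop1_finds lines 0 lines.length f (Nat.zero_le _) hfm.1 hbefore hfm.2
    have h2 : pvLoop2 lines f lines.length = l + 1 :=
      pvLoop2_finds lines f lines.length l hfl hlm.1 hafter hlm.2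
    rw [hI] at hlast
    simp only [h1, h2, List.head?_cons, hlast]
    push_cast
    ring_nf

-- ===== VERDICT (by name: the statement is the Claim_ definition above) =====
theorem trim_blank_edges_py_spec : Claim_equal_trim_blank_edges_py := by
  intro lines _
  unfold Spec_trim_blank_edges_py
  exact trim_blank_edges_py_eq lines
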